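-- pv_equiv track=rewrite | github.com/g4nd4lf/AdventOfCode | 2023/day20/day20_1.py | consecutive_nodes
-- ===== SOURCE A (Python) =====
-- def consecutive_nodes(prox,actual,padres):
--     n4=prox
--     n3=actual
--     if n3 in padres:
--         if padres[n3]==None:
--             return 0
--         else:
--             n2=padres[n3]
--     else:
--         return 0
--     if n2 in padres:
--         if padres[n2]==None:
--             return 0
--         else:
--             n1=padres[n2]
--     else:
--         return 0
--     if n1 in padres:
--         if padres[n1]==None:
--             return 0
--         else:
--             n0=padres[n1]
--     else:
--         return 0
--
--     xs=[x[0] for x in [n0,n1,n2,n3,n4]]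
--     ys=[x[1] for x in [n0,n1,n2,n3,n4]]
--     x_counts=[xs.count(x) for x in xs]
--     y_counts=[ys.count(x) for x in ys]
--     return max(max(x_counts),max(y_counts))
-- ===== SOURCE B (Python) =====
-- def consecutive_nodes(prox, actual, padres):
--     def ancestors(node, k):
--         # list of k strict ancestors of node, or None if the chain breaks
--         if k == 0:
--             return []
--         if node not in padres or padres[node] == None:
--             return None
--         rest = ancestors(padres[node], k - 1)
--         return None if rest is None else [padres[node]] + rest
--
--     chain = ancestors(actual, 3)
--     if chain is None:
--         return 0
--
--     def longest_run(vals):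
--         # max multiplicity = longest run of equal values after sorting
--         best, run, prev = 1, 1, None
--         for v in sorted(vals):
--             run = run + 1 if v == prev else 1
--             if run > best:
--                 best = run
--             prev = v
--         return best
--
--     pts = [actual] + chain + [prox]
--     return max(longest_run([p[0] for p in pts]), longest_run([p[1] for p in pts]))
-- ===== Notes on version B (the rewrite author's own statement) =====
-- stated objective: alternative
-- what changed: B builds the ancestor chain with a recursive helper instead of three copy-pasted lookup blocks, and computes the max coordinate multiplicity by sorting each coordinate list and scanning for the longest run of equal values instead of A's quadratic max over per-element list.count.
import Mathlib
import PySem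

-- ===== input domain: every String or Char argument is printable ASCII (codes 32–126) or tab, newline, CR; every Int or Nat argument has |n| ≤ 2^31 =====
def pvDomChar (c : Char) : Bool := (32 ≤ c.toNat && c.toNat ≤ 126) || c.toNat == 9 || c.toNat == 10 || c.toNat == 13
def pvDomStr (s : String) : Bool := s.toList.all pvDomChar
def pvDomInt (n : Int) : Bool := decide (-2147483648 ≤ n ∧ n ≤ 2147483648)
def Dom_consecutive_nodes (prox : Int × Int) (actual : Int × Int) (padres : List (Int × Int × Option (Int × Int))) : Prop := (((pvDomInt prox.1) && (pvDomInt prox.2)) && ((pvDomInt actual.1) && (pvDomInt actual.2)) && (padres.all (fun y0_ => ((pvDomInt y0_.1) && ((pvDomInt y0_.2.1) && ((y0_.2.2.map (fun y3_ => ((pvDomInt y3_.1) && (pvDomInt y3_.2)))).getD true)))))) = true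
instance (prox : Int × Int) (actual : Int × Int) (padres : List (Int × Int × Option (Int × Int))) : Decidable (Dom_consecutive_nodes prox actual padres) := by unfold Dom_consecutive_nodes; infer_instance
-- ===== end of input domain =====

-- B builds the ancestor chain with a recursive helper instead of A's three copy-pasted
-- lookup blocks, and finds the max coordinate multiplicity by sorting each coordinate
-- list and scanning for the longest equal run, instead of A's max over list.count.

-- the Python dict argument, rebuilt from the association list (last value wins, like dict(pairs))
def pvDictOf (padres : List (Int × Int × Option (Int × Int))) :
    PySem.Dict (Int × Int) (Option (Int × Int)) :=
  PySem.Dict.ofList (padres.map (fun e => ((e.1, e.2.1), e.2.2)))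

-- ===== PORT A =====
def consecutive_nodes (prox : Int × Int) (actual : Int × Int) (padres : List (Int × Int × Option (Int × Int))) : Int :=
  let n4 := prox
  let n3 := actual
  match (pvDictOf padres).get? n3 with            -- if n3 in padres: padres[n3]
  | none => 0
  | some none => 0                                -- padres[n3] == None
  | some (some n2) =>
    match (pvDictOf padres).get? n2 with
    | none => 0
    | some none => 0
    | some (some n1) =>
      match (pvDictOf padres).get? n1 with
      | none => 0
      | some none => 0
      | some (some n0) =>
        let xs := ([n0, n1, n2, n3, n4] : List (Int × Int)).map (·.1)
        let ys := ([n0, n1, n2, n3, n4] : List (Int × Int)).map (·.2)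
        let x_counts := xs.map (fun x => (xs.count x : Int))
        let y_counts := ys.map (fun x => (ys.count x : Int))
        -- Python max() on these 5-element (hence nonempty) lists: .getD 0 is unreachable
        max ((PySem.List.max? x_counts (fun y => y)).getD 0)
            ((PySem.List.max? y_counts (fun y => y)).getD 0)

-- ===== PORT B =====
-- ancestors(node, k): k strict ancestors of node, or none if the chain breaks
def pvAncestors (d : PySem.Dict (Int × Int) (Option (Int × Int))) :
    Nat → (Int × Int) → Option (List (Int × Int))
  | 0, _ => some []
  | k + 1, node =>
    match d.get? node with
    | none => none                                -- node not in padres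
    | some none => none                           -- padres[node] == None
    | some (some p) =>
      match pvAncestors d k p with
      | none => none
      | some rest => some (p :: rest)

-- one step of longest_run's loop: state = (best, run, prev)
def pvStep (st : Int × Int × Option Int) (v : Int) : Int × Int × Option Int :=
  let run := if some v == st.2.2 then st.2.1 + 1 else 1
  (if run > st.1 then run else st.1, run, some v)

-- longest_run(vals): longest run of equal values in sorted(vals)
def pvLongestRun (vals : List Int) : Int :=
  ((PySem.List.sorted vals (fun y => y) false).foldl pvStep (1, 1, none)).1

def consecutive_nodes_alt (prox : Int × Int) (actual : Int × Int) (padres : List (Int × Int × Option (Int × Int))) : Int :=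
  match pvAncestors (pvDictOf padres) 3 actual with
  | none => 0
  | some chain =>
    let pts := [actual] ++ chain ++ [prox]
    max (pvLongestRun (pts.map (·.1))) (pvLongestRun (pts.map (·.2)))

-- ===== PRECONDITION & SPEC =====
def Spec_consecutive_nodes (prox : Int × Int) (actual : Int × Int) (padres : List (Int × Int × Option (Int × Int))) (out : Int) : Prop := out = consecutive_nodes_alt prox actual padres
instance (prox : Int × Int) (actual : Int × Int) (padres : List (Int × Int × Option (Int × Int))) (out : Int) : Decidable (Spec_consecutive_nodes prox actual padres out) := by unfold Spec_consecutive_nodes; infer_instance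

-- ===== CLAIM (what is proved, stated in full; the proofs are below) =====
def Claim_equal_consecutive_nodes : Prop := ∀ (prox : Int × Int) (actual : Int × Int) (padres : List (Int × Int × Option (Int × Int))), Dom_consecutive_nodes prox actual padres → Spec_consecutive_nodes prox actual padres (consecutive_nodes prox actual padres)

-- ===== LEMMAS AND PROOFS =====

-- A's per-axis value: first maximum of the per-element counts (0 only for the empty list)
def pvAVal (l : List Int) : Int :=
  (PySem.List.max? (l.map fun x => (l.count x : Int)) (fun y => y)).getD 0

-- Python max() depends only on the set of elements (for the identity key on Int)
theorem pvMaxD_eq_of_mem_iff (xs ys : List Int) (hx : xs ≠ [])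
    (h : ∀ a, a ∈ xs ↔ a ∈ ys) :
    (PySem.List.max? xs (fun y => y)).getD 0 = (PySem.List.max? ys (fun y => y)).getD 0 := by
  obtain ⟨x, hxm⟩ := List.exists_mem_of_ne_nil xs hx
  have hy : ys ≠ [] := List.ne_nil_of_mem ((h x).mp hxm)
  obtain ⟨m1, hm1⟩ : ∃ m, PySem.List.max? xs (fun y => y) = some m := by
    cases e : PySem.List.max? xs (fun y => y) with
    | none => exact absurd ((PySem.List.max?_eq_none_iff xs _).mp e) hx
    | some m => exact ⟨m, rfl⟩
  obtain ⟨m2, hm2⟩ : ∃ m, PySem.List.max? ys (fun y => y) = some m := by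
    cases e : PySem.List.max? ys (fun y => y) with
    | none => exact absurd ((PySem.List.max?_eq_none_iff ys _).mp e) hy
    | some m => exact ⟨m, rfl⟩
  have h12 : m1 ≤ m2 := PySem.List.max?_isMax hm2 m1 ((h m1).mp (PySem.List.max?_mem hm1))
  have h21 : m2 ≤ m1 := PySem.List.max?_isMax hm1 m2 ((h m2).mpr (PySem.List.max?_mem hm2))
  rw [hm1, hm2, le_antisymm h12 h21]

-- pvAVal is invariant under permutation
theorem pvAVal_perm (l l' : List Int) (hp : l.Perm l') : pvAVal l = pvAVal l' := by
  by_cases hl : l = []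
  · subst hl; rw [List.nil_perm.mp hp]
  · unfold pvAVal
    apply pvMaxD_eq_of_mem_iff
    · simp [hl]
    · intro a
      simp only [List.mem_map]
      constructor
      · rintro ⟨x, hx, rfl⟩
        exact ⟨x, hp.mem_iff.mp hx, by rw [hp.count_eq]⟩
      · rintro ⟨x, hx, rfl⟩
        exact ⟨x, hp.mem_iff.mpr hx, by rw [hp.count_eq]⟩

-- appending one element: the max multiplicity is the old one or the new element's count
theorem pvAVal_append (s : List Int) (v : Int) (hs : s ≠ []) :
    pvAVal (s ++ [v]) = max (pvAVal s) (((s ++ [v]).count v : Int)) := by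
  obtain ⟨m, hm⟩ : ∃ m, PySem.List.max? ((s ++ [v]).map fun x => ((s ++ [v]).count x : Int)) (fun y => y) = some m := by
    cases e : PySem.List.max? ((s ++ [v]).map fun x => ((s ++ [v]).count x : Int)) (fun y => y) with
    | none => simp [PySem.List.max?_eq_none_iff] at e
    | some m => exact ⟨m, rfl⟩
  obtain ⟨m', hm'⟩ : ∃ m', PySem.List.max? (s.map fun x => ((s.count x : Int))) (fun y => y) = some m' := by
    cases e : PySem.List.max? (s.map fun x => ((s.count x : Int))) (fun y => y) with
    | none => exact absurd (List.map_eq_nil_iff.mp ((PySem.List.max?_eq_none_iff _ _).mp e)) hs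
    | some m' => exact ⟨m', rfl⟩
  unfold pvAVal
  rw [hm, hm']
  simp only [Option.getD_some]
  -- m = max m' (count v (s ++ [v]))
  apply le_antisymm
  · -- m ≤ max
    obtain ⟨x, hx, hxc⟩ := List.mem_map.mp (PySem.List.max?_mem hm)
    by_cases hxv : x = v
    · subst hxv
      rw [← hxc]; exact le_max_right _ _
    · have hxs : x ∈ s := by
        rcases List.mem_append.mp hx with h | h
        · exact h
        · simp at h; exact absurd h hxv
      have : ((s ++ [v]).count x : Int) = (s.count x : Int) := by
        rw [List.count_append]
        have : List.count x [v] = 0 := by simp [List.count_singleton]; exact fun h => hxv h.symm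
        rw [this]; simp
      have hle : (s.count x : Int) ≤ m' :=
        PySem.List.max?_isMax hm' _ (List.mem_map.mpr ⟨x, hxs, rfl⟩)
      rw [← hxc, this]
      exact le_trans hle (le_max_left _ _)
  · -- max ≤ m
    apply max_le
    · obtain ⟨y, hy, hyc⟩ := List.mem_map.mp (PySem.List.max?_mem hm')
      have h1 : ((s ++ [v]).count y : Int) ≤ m :=
        PySem.List.max?_isMax hm _ (List.mem_map.mpr ⟨y, List.mem_append_left _ hy, rfl⟩)
      have h2 : (s.count y : Int) ≤ ((s ++ [v]).count y : Int) := by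
        rw [List.count_append]; push_cast; omega
      omega
    · exact PySem.List.max?_isMax hm _
        (List.mem_map.mpr ⟨v, List.mem_append_right _ (by simp), rfl⟩)

-- in a ≤-sorted list every element is ≤ the last one
theorem pv_le_getLast (s : List Int) (hp : s.Pairwise (· ≤ ·)) (x : Int) (hx : x ∈ s)
    (l0 : Int) (hl : s.getLast? = some l0) : x ≤ l0 := by
  induction s with
  | nil => cases hx
  | cons a t ih =>
    cases t with
    | nil =>
      simp at hl hx; omega
    | cons b t' =>
      rw [List.getLast?_cons_cons] at hl
      rcases List.mem_cons.mp hx with rfl | hxt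
      · have hmem : l0 ∈ b :: t' := List.mem_of_getLast? hl
        exact (List.pairwise_cons.mp hp).1 l0 hmem
      · exact ih (List.pairwise_cons.mp hp).2 hxt hl

-- the scan over a sorted list computes (max multiplicity, count of the last element, last element)
theorem pvScan_sorted (s : List Int) :
    s.Pairwise (· ≤ ·) → ∀ l0 : Int, s.getLast? = some l0 →
    s.foldl pvStep (1, 1, none) = (pvAVal s, (s.count l0 : Int), some l0) := by
  induction s using List.reverseRecOn with
  | nil => intro _ l0 hl; simp at hl
  | append_singleton s a ih =>
    intro hp l0 hl
    rw [List.getLast?_append_cons] at hl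
    simp only [List.getLast?_singleton, Option.some.injEq] at hl
    subst hl
    rw [List.foldl_append]
    rcases List.pairwise_append.mp hp with ⟨hps, -, hall⟩
    cases hs : s with
    | nil =>
      subst hs
      simp [pvStep, pvAVal, PySem.List.max?_id_cons]
    | cons c t =>
      have hsne : s ≠ [] := by rw [hs]; exact List.cons_ne_nil _ _
      obtain ⟨m, hm⟩ : ∃ m, s.getLast? = some m := by
        rw [hs]; exact ⟨(c :: t).getLast (List.cons_ne_nil _ _), List.getLast?_eq_some_getLast (List.cons_ne_nil _ _)⟩
      rw [← hs] at *
      rw [ih hps m hm]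
      have hcount : (if some a == some m then ((s.count m : Int)) + 1 else 1)
          = (((s ++ [a]).count a : Int)) := by
        by_cases he : a = m
        · subst he
          simp [List.count_append]
        · have hbe : (some a == some m) = false := by
            simp [he]
          rw [hbe]
          have hnot : a ∉ s := by
            intro hmem
            have h1 : a ≤ m := pv_le_getLast s hps a hmem m hm
            have h2 : m ≤ a := hall m (List.mem_of_getLast? hm) a (by simp)
            exact he (le_antisymm h1 h2)
          rw [List.count_append, List.count_eq_zero_of_not_mem hnot]
          simp
      simp only [List.foldl_cons, List.foldl_nil, pvStep]
      rw [pvAVal_append s a hsne, hcount]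
      have hmax : (if ((List.count a (s ++ [a]) : Int)) > pvAVal s
          then ((List.count a (s ++ [a]) : Int)) else pvAVal s)
          = max (pvAVal s) ((List.count a (s ++ [a]) : Int)) := by
        split_ifs with h <;> omega
      rw [hmax]

-- B's longest_run equals A's max-of-counts on any nonempty list
theorem pvLongestRun_eq (l : List Int) (hl : l ≠ []) : pvLongestRun l = pvAVal l := by
  unfold pvLongestRun
  have hperm : (PySem.List.sorted l (fun y => y) false).Perm l := PySem.List.sorted_perm l _ _
  have hsne : PySem.List.sorted l (fun y => y) false ≠ [] := by
    intro h
    exact hl (List.nil_perm.mp (h ▸ hperm))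
  obtain ⟨l0, hl0⟩ : ∃ l0, (PySem.List.sorted l (fun y => y) false).getLast? = some l0 :=
    ⟨_, List.getLast?_eq_some_getLast hsne⟩
  have hpw : (PySem.List.sorted l (fun y => y) false).Pairwise (· ≤ ·) := by
    have := PySem.List.sorted_pairwise (xs := l) (key := fun y => y)
    simpa using this
  rw [pvScan_sorted _ hpw l0 hl0]
  exact pvAVal_perm _ _ hperm

-- ===== VERDICT (by name: the statement is the Claim_ definition above) =====
theorem consecutive_nodes_spec : Claim_equal_consecutive_nodes := by
  unfold Claim_equal_consecutive_nodes
  intro prox actual padres _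
  unfold Spec_consecutive_nodes consecutive_nodes consecutive_nodes_alt
  cases h3 : (pvDictOf padres).get? actual with
  | none => simp [pvAncestors, h3]
  | some v3 =>
    cases v3 with
    | none => simp [pvAncestors, h3]
    | some n2 =>
      cases h2 : (pvDictOf padres).get? n2 with
      | none => simp [pvAncestors, h3, h2]
      | some v2 =>
        cases v2 with
        | none => simp [pvAncestors, h3, h2]
        | some n1 =>
          cases h1 : (pvDictOf padres).get? n1 with
          | none => simp [pvAncestors, h3, h2, h1]
          | some v1 =>
            cases v1 with
            | none => simp [pvAncestors, h3, h2, h1]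
            | some n0 =>
              have hch : pvAncestors (pvDictOf padres) 3 actual = some [n2, n1, n0] := by
                simp [pvAncestors, h3, h2, h1]
              simp only [hch, h3, h2, h1]
              have hp : ([n0, n1, n2, actual, prox] : List (Int × Int)).Perm
                  [actual, n2, n1, n0, prox] := by
                have := (List.reverse_perm ([n0, n1, n2, actual] : List (Int × Int))).symm.append_right [prox]
                simpa using this
              have hx := pvLongestRun_eq
                (([actual, n2, n1, n0, prox] : List (Int × Int)).map (·.1)) (by simp)
              have hy := pvLongestRun_eq
                (([actual, n2, n1, n0, prox] : List (Int × Int)).map (·.2)) (by simp)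
              have hax := pvAVal_perm
                (([n0, n1, n2, actual, prox] : List (Int × Int)).map (·.1))
                (([actual, n2, n1, n0, prox] : List (Int × Int)).map (·.1))
                (hp.map (·.1))
              have hay := pvAVal_perm
                (([n0, n1, n2, actual, prox] : List (Int × Int)).map (·.2))
                (([actual, n2, n1, n0, prox] : List (Int × Int)).map (·.2))
                (hp.map (·.2))
              simp only [pvAVal, List.cons_append, List.nil_append, List.map_cons,
                List.map_nil] at hx hy hax hay ⊢
              rw [hx, hy, hax, hay]
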